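-- pv_equiv track=rewrite | github.com/willizdev/compuba | Algoritmos/Introducción a la Programación/Python/Guías/Guía 10 - Integradora/p10.py | racha_mas_larga
-- ===== SOURCE A (Python) =====
-- def racha_mas_larga(tiempos: list[int]) -> (int, int):
--     racha: int = 0
--     inicio: int = 0
--     fin: int = 0
--     for i in range(0, len(tiempos)):
--         escapes: int = 0
--         f: int = i
--         for j in range(i, len(tiempos)):
--             if not (1 <= tiempos[j] and tiempos[j] <= 60):
--                 break
--             f = j
--             escapes += 1
--         if escapes > racha:
--             racha = escapes
--             inicio = i
--             fin = f
--     return (inicio, fin)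
-- ===== SOURCE B (Python) =====
-- def racha_mas_larga(tiempos: list[int]) -> (int, int):
--     # suffix DP: runs[i] = length of the contiguous block of values in [1, 60] starting at i
--     runs = []
--     nxt = 0
--     for x in reversed(tiempos):
--         nxt = nxt + 1 if 1 <= x <= 60 else 0
--         runs.append(nxt)
--     runs.reverse()
--     best, inicio, fin = 0, 0, 0
--     for i, r in enumerate(runs):
--         if r > best:
--             best, inicio, fin = r, i, i + r - 1
--     return (inicio, fin)
-- ===== Notes on version B (the rewrite author's own statement) =====
-- stated objective: faster
-- what changed: Replaced the quadratic nested scan (restart a run count at every index) by a linear suffix dynamic program: one reversed pass computes the run length starting at each index, one forward pass picks the first maximum.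
import Mathlib
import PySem

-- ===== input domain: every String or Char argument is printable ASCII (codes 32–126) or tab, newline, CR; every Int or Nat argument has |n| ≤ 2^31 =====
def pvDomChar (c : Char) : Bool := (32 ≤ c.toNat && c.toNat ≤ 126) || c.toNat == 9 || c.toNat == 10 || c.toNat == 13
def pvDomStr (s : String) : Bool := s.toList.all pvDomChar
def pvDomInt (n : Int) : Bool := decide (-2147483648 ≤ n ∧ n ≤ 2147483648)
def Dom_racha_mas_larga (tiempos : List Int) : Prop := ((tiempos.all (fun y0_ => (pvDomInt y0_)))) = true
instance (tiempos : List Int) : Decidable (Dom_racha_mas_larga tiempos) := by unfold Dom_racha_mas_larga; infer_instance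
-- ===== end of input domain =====

-- B replaces A's quadratic nested scan by a linear suffix DP (run length starting at each
-- index computed in one reversed pass, then one forward pass for the first maximum).

-- ===== PORT A =====
-- inner loop 'for j in range(i, len(tiempos))' with its break, state (escapes, f, broken)
def pvInnerA (tiempos : List Int) (s : Int × Int × Bool) (j : Int) : Int × Int × Bool :=
  if s.2.2 then s
  else if ¬ (1 ≤ PySem.List.pyGetD tiempos j 0 ∧ PySem.List.pyGetD tiempos j 0 ≤ 60) then
    (s.1, s.2.1, true)
  else (s.1 + 1, j, false)

-- outer loop body: run the inner loop from i, then 'if escapes > racha'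
def pvOuterA (tiempos : List Int) (st : Int × Int × Int) (i : Int) : Int × Int × Int :=
  let inner := (PySem.List.pyRange i (tiempos.length : Int) 1).foldl (pvInnerA tiempos) (0, i, false)
  if inner.1 > st.1 then (inner.1, i, inner.2.1) else st

def racha_mas_larga (tiempos : List Int) : List Int :=
  let st := (PySem.List.pyRange 0 (tiempos.length : Int) 1).foldl (pvOuterA tiempos) (0, 0, 0)
  [st.2.1, st.2.2]

-- ===== PORT B =====
-- 'if r > best: best, inicio, fin = r, i, i + r - 1'
def pvStepB (st : Int × Int × Int) (p : Int × Int) : Int × Int × Int :=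
  if p.2 > st.1 then (p.2, p.1, p.1 + p.2 - 1) else st

def racha_mas_larga_alt (tiempos : List Int) : List Int :=
  -- reversed-pass suffix DP (Source B's reversed append + reverse = this foldr)
  let runs : List Int :=
    tiempos.foldr (fun x acc => (if 1 ≤ x ∧ x ≤ 60 then acc.headD 0 + 1 else 0) :: acc) []
  let st := (PySem.List.enumerate runs).foldl pvStepB (0, 0, 0)
  [st.2.1, st.2.2]

-- ===== PRECONDITION & SPEC =====
def Spec_racha_mas_larga (tiempos : List Int) (out : List Int) : Prop := out = racha_mas_larga_alt tiempos
instance (tiempos : List Int) (out : List Int) : Decidable (Spec_racha_mas_larga tiempos out) := by unfold Spec_racha_mas_larga; infer_instance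

-- ===== CLAIM (what is proved, stated in full; the proofs are below) =====
def Claim_equal_racha_mas_larga : Prop := ∀ (tiempos : List Int), Dom_racha_mas_larga tiempos → Spec_racha_mas_larga tiempos (racha_mas_larga tiempos)

-- ===== LEMMAS AND PROOFS =====

-- length of the maximal prefix of values in [1,60]
def pvRunLen : List Int → Int
  | [] => 0
  | x :: xs => if 1 ≤ x ∧ x ≤ 60 then pvRunLen xs + 1 else 0

def pvRuns (xs : List Int) : List Int :=
  xs.foldr (fun x acc => (if 1 ≤ x ∧ x ≤ 60 then acc.headD 0 + 1 else 0) :: acc) []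

theorem pvRunLen_nonneg (xs : List Int) : 0 ≤ pvRunLen xs := by
  induction xs with
  | nil => simp [pvRunLen]
  | cons x xs ih => simp only [pvRunLen]; split <;> omega

theorem pvRuns_headD (xs : List Int) : (pvRuns xs).headD 0 = pvRunLen xs := by
  induction xs with
  | nil => rfl
  | cons x xs ih => simp [pvRuns, pvRunLen] at ih ⊢; rw [ih]

theorem pvRuns_cons (x : Int) (xs : List Int) :
    pvRuns (x :: xs) = pvRunLen (x :: xs) :: pvRuns xs := by
  show (if 1 ≤ x ∧ x ≤ 60 then (pvRuns xs).headD 0 + 1 else 0) :: pvRuns xs = _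
  rw [pvRuns_headD]; simp [pvRunLen]

-- the inner fold after a break is the identity
theorem pvInnerA_broken (tiempos : List Int) (js : List Int) (e f : Int) :
    js.foldl (pvInnerA tiempos) (e, f, true) = (e, f, true) := by
  induction js with
  | nil => rfl
  | cons j js ih => simpa [pvInnerA] using ih

-- the inner loop counts the run of in-range values starting at i
theorem pvInnerA_spec (tiempos xs : List Int) (i e f : Int) (hi : 0 ≤ i)
    (hdrop : tiempos.drop i.toNat = xs) :
    ∃ b, (PySem.List.pyRange i (tiempos.length : Int) 1).foldl (pvInnerA tiempos) (e, f, false)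
      = (e + pvRunLen xs, if pvRunLen xs = 0 then f else i + pvRunLen xs - 1, b) := by
  induction xs generalizing i e f with
  | nil =>
    have hlen : tiempos.length ≤ i.toNat := List.drop_eq_nil_iff.mp hdrop
    rw [PySem.List.pyRange_one_eq_nil (by omega)]
    exact ⟨false, by simp [pvRunLen]⟩
  | cons x xs ih =>
    have hlen : i.toNat < tiempos.length := by
      by_contra h
      rw [List.drop_eq_nil_iff.mpr (by omega)] at hdrop
      exact List.cons_ne_nil x xs hdrop.symm
    have hi' : i < (tiempos.length : Int) := by omega
    have hx : PySem.List.pyGetD tiempos i 0 = x := by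
      rw [PySem.List.pyGetD_eq_getElem tiempos 0 hi (by exact_mod_cast hi')]
      have h0 : (tiempos.drop i.toNat)[0]'(by rw [hdrop]; simp) = x := by
        simp [hdrop]
      rw [List.getElem_drop] at h0
      simpa using h0
    have hdrop' : tiempos.drop (i + 1).toNat = xs := by
      have ht : (i + 1).toNat = i.toNat + 1 := by omega
      rw [ht, ← List.tail_drop, hdrop]
      rfl
    rw [PySem.List.pyRange_one_cons hi']
    simp only [List.foldl_cons]
    by_cases hok : 1 ≤ x ∧ x ≤ 60
    · have hstep : pvInnerA tiempos (e, f, false) i = (e + 1, i, false) := by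
        simp [pvInnerA, hx, hok]
      rw [hstep]
      obtain ⟨b, hb⟩ := ih (i + 1) (e + 1) i (by omega) hdrop'
      refine ⟨b, ?_⟩
      have hL := pvRunLen_nonneg xs
      have h1 : pvRunLen (x :: xs) = pvRunLen xs + 1 := by simp [pvRunLen, hok]
      rw [hb, h1, if_neg (by omega : ¬ pvRunLen xs + 1 = 0)]
      have h2 : (if pvRunLen xs = 0 then i else i + 1 + pvRunLen xs - 1)
          = i + (pvRunLen xs + 1) - 1 := by split_ifs <;> omega
      have h4 : e + 1 + pvRunLen xs = e + (pvRunLen xs + 1) := by ring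
      rw [h2, h4]
    · have hstep : pvInnerA tiempos (e, f, false) i = (e, f, true) := by
        simp [pvInnerA, hx, hok]
      rw [hstep, pvInnerA_broken]
      exact ⟨true, by simp [pvRunLen, hok]⟩

-- main loop correspondence: A's outer fold from i equals B's fold over the enumerated suffix runs
theorem pvMain (tiempos : List Int) (xs : List Int) (i : Int) (st : Int × Int × Int)
    (hi : 0 ≤ i) (hdrop : tiempos.drop i.toNat = xs) (hst : 0 ≤ st.1) :
    (PySem.List.pyRange i (tiempos.length : Int) 1).foldl (pvOuterA tiempos) st
      = (PySem.List.enumerate (pvRuns xs) i).foldl pvStepB st := by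
  induction xs generalizing i st with
  | nil =>
    have hlen : tiempos.length ≤ i.toNat := List.drop_eq_nil_iff.mp hdrop
    rw [PySem.List.pyRange_one_eq_nil (by omega)]
    rfl
  | cons x xs ih =>
    have hlen : i.toNat < tiempos.length := by
      by_contra h
      rw [List.drop_eq_nil_iff.mpr (by omega)] at hdrop
      exact List.cons_ne_nil x xs hdrop.symm
    have hi' : i < (tiempos.length : Int) := by omega
    have hdrop' : tiempos.drop (i + 1).toNat = xs := by
      have ht : (i + 1).toNat = i.toNat + 1 := by omega
      rw [ht, ← List.tail_drop, hdrop]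
      rfl
    obtain ⟨b, hb⟩ := pvInnerA_spec tiempos (x :: xs) i 0 i hi hdrop
    have hL := pvRunLen_nonneg (x :: xs)
    have hstep : pvOuterA tiempos st i = pvStepB st (i, pvRunLen (x :: xs)) := by
      unfold pvOuterA pvStepB
      rw [hb]
      by_cases hgt : pvRunLen (x :: xs) > st.1
      · have hne : ¬ pvRunLen (x :: xs) = 0 := by omega
        simp [hgt, hne]
      · simp [hgt]
    rw [PySem.List.pyRange_one_cons hi', pvRuns_cons, PySem.List.enumerate_cons]
    simp only [List.foldl_cons]
    rw [hstep]
    refine ih (i + 1) (pvStepB st (i, pvRunLen (x :: xs))) (by omega) hdrop' ?_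
    unfold pvStepB
    split_ifs
    · exact hL
    · exact hst

-- ===== VERDICT (by name: the statement is the Claim_ definition above) =====
theorem racha_mas_larga_spec : Claim_equal_racha_mas_larga := by
  intro tiempos _
  unfold Spec_racha_mas_larga racha_mas_larga racha_mas_larga_alt
  rw [pvMain tiempos tiempos 0 (0,0,0) le_rfl (by simp) (by simp)]
  rfl
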